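-- pv_equiv track=rewrite | github.com/nhhai196/Ticket-Reassignment | gendata_v4.py | genID
-- ===== SOURCE A (Python) =====
-- def genID(famdict):
-- 	numf = len(famdict)
-- 	tupletoID = {}
-- 	ID = 1
-- 	for i in range(1, numf+1):
-- 		if tuple(famdict[i]) not in tupletoID:
-- 			tupletoID[tuple(famdict[i])] = ID
-- 			ID += 1
-- 	return tupletoID
-- ===== SOURCE B (Python) =====
-- def genID(famdict):
--     vals = [tuple(famdict[i]) for i in range(1, len(famdict) + 1)]
--     return {t: len(set(vals[:vals.index(t) + 1])) for t in vals}
-- ===== Notes on version B (the rewrite author's own statement) =====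
-- stated objective: alternative
-- what changed: B drops the sequential ID counter and seen-dict entirely: it computes each tuple's ID independently as the number of distinct tuples in the prefix ending at its first occurrence (vals.index + set cardinality), building the result in one dict comprehension.
import Mathlib
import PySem

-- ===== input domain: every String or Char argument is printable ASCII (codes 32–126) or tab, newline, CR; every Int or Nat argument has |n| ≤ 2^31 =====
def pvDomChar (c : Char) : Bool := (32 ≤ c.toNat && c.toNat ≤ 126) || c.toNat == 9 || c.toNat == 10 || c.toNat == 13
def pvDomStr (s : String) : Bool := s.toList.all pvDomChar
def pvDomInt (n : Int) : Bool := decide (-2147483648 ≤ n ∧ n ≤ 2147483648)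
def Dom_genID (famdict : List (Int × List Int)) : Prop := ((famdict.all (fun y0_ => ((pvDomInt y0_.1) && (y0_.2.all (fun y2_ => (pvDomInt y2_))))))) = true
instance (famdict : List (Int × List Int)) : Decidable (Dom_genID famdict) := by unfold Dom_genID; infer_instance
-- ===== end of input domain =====

-- B replaces A's sequential counter + seen-dict with an independent per-tuple computation:
-- each tuple's ID is the number of distinct tuples in the prefix ending at its first occurrence.

-- ===== PORT A =====
def genID (famdict : List (Int × List Int)) : List (List Int × Int) :=
  let numf : Int := famdict.length
  let st := (PySem.List.pyRange 1 (numf + 1) 1).foldl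
    (fun (st : PySem.Dict (List Int) Int × Int) i =>
      let t := ((PySem.Dict.mk famdict).get? i).getD []
      if st.1.contains t then st else (st.1.insert t st.2, st.2 + 1))
    (PySem.Dict.empty, 1)
  st.1.items

-- ===== PORT B =====
-- 'vals.index t' always succeeds since t is drawn from vals; the '.getD 0' default is unreachable.
def genID_alt (famdict : List (Int × List Int)) : List (List Int × Int) :=
  let numf : Int := famdict.length
  let vals := (PySem.List.pyRange 1 (numf + 1) 1).map
    (fun i => ((PySem.Dict.mk famdict).get? i).getD [])
  (vals.foldl
    (fun (d : PySem.Dict (List Int) Int) t =>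
      d.insert t
        ((PySem.Set.ofList (PySem.List.slice vals none
            (some ((((PySem.List.index? vals t).getD 0 : Nat) : Int) + 1)))).length : Int))
    PySem.Dict.empty).items

-- ===== PRECONDITION & SPEC =====
-- Pre_ excludes inputs on which Python A raises KeyError (the dict's keys are not exactly
-- 1..len(famdict)); duplicate keys are excluded too since a Python dict cannot have them.
def Pre_genID (famdict : List (Int × List Int)) : Prop :=
  (famdict.map Prod.fst).Nodup ∧
  ((PySem.List.pyRange 1 ((famdict.length : Int) + 1) 1).all
    (fun i => (PySem.Dict.mk famdict).contains i)) = true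
instance (famdict : List (Int × List Int)) : Decidable (Pre_genID famdict) := by
  unfold Pre_genID; infer_instance
def pvWitness_genID : (List (Int × List Int)) := [(1, [5]), (2, [5]), (3, [7])]
def Spec_genID (famdict : List (Int × List Int)) (out : List (List Int × Int)) : Prop := out = genID_alt famdict
instance (famdict : List (Int × List Int)) (out : List (List Int × Int)) : Decidable (Spec_genID famdict out) := by unfold Spec_genID; infer_instance

-- ===== CLAIM (what is proved, stated in full; the proofs are below) =====
def Claim_equal_genID : Prop := ∀ (famdict : List (Int × List Int)), Dom_genID famdict → Pre_genID famdict → Spec_genID famdict (genID famdict)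

-- ===== LEMMAS AND PROOFS =====

-- A's result, characterised: the deduped value list numbered 1,2,3,…
def pvNumb (s : List (List Int)) : List (List Int × Int) :=
  (PySem.List.enumerate s 0).map (fun p => (p.2, p.1 + 1))

lemma pvNumb_append (s : List (List Int)) (t : List Int) :
    pvNumb (s ++ [t]) = pvNumb s ++ [(t, (s.length : Int) + 1)] := by
  simp [pvNumb, PySem.List.enumerate_append, PySem.List.enumerate_cons]

lemma pvNumb_keys (s : List (List Int)) :
    (pvNumb s).map (·.1) = s := by
  simp only [pvNumb, List.map_map, Function.comp_def]
  exact PySem.List.map_snd_enumerate s 0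

lemma pvContains_mk_numb (s : List (List Int)) (t : List Int) :
    (PySem.Dict.mk (pvNumb s)).contains t = decide (t ∈ s) := by
  rw [PySem.Dict.contains_eq_decide_mem_keys,
    show (PySem.Dict.mk (pvNumb s)).keys = s from by
      rw [PySem.Dict.keys_mk, pvNumb_keys]]

lemma pv_key (l : List (List Int)) :
    ∀ (s : List (List Int)),
    (l.foldl (fun (st : PySem.Dict (List Int) Int × Int) t =>
        if st.1.contains t then st else (st.1.insert t st.2, st.2 + 1))
      (PySem.Dict.mk (pvNumb s), (s.length : Int) + 1)).1.items
    = pvNumb (l.foldl PySem.Set.add s) := by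
  induction l with
  | nil => intro s; rfl
  | cons t l ih =>
    intro s
    simp only [List.foldl_cons]
    by_cases h : t ∈ s
    · rw [pvContains_mk_numb]
      simp only [h, decide_true, if_true, PySem.Set.add_of_mem h]
      exact ih s
    · have hc : (PySem.Dict.mk (pvNumb s)).contains t = false := by
        rw [pvContains_mk_numb]; simp [h]
      have hd : (PySem.Dict.mk (pvNumb s)).insert t ((s.length : Int) + 1)
          = PySem.Dict.mk (pvNumb (s ++ [t])) := by
        apply PySem.Dict.ext
        rw [PySem.Dict.items_insert_of_not_contains _ _ hc, pvNumb_append]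
      have hadd : PySem.Set.add s t = s ++ [t] := PySem.Set.add_of_not_mem h
      have hlen : ((s ++ [t]).length : Int) + 1 = ((s.length : Int) + 1) + 1 := by
        push_cast [List.length_append]; simp
      rw [pvContains_mk_numb]
      simp only [h, decide_false, Bool.false_eq_true, if_false]
      rw [hd, show ((s.length : Int) + 1) + 1 = ((s ++ [t]).length : Int) + 1 from hlen.symm,
        hadd]
      exact ih (s ++ [t])

-- A = pvNumb (dedup vals)
lemma pvA_eq (famdict : List (Int × List Int)) :
    genID famdict
      = pvNumb (PySem.Set.ofList ((PySem.List.pyRange 1 ((famdict.length : Int) + 1) 1).map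
          (fun i => ((PySem.Dict.mk famdict).get? i).getD []))) := by
  show (((PySem.List.pyRange 1 ((famdict.length : Int) + 1) 1).foldl
      (fun (st : PySem.Dict (List Int) Int × Int) i =>
        let t := ((PySem.Dict.mk famdict).get? i).getD []
        if st.1.contains t then st else (st.1.insert t st.2, st.2 + 1))
      (PySem.Dict.empty, 1)).1.items) = _
  rw [show ((PySem.List.pyRange 1 ((famdict.length : Int) + 1) 1).foldl
      (fun (st : PySem.Dict (List Int) Int × Int) i =>
        let t := ((PySem.Dict.mk famdict).get? i).getD []
        if st.1.contains t then st else (st.1.insert t st.2, st.2 + 1))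
      (PySem.Dict.empty, 1))
    = (((PySem.List.pyRange 1 ((famdict.length : Int) + 1) 1).map
        (fun i => ((PySem.Dict.mk famdict).get? i).getD [])).foldl
      (fun (st : PySem.Dict (List Int) Int × Int) t =>
        if st.1.contains t then st else (st.1.insert t st.2, st.2 + 1))
      (PySem.Dict.mk (pvNumb []), (([] : List (List Int)).length : Int) + 1))
    from by rw [List.foldl_map]; rfl]
  rw [pv_key, ← PySem.Set.ofList_eq_foldl]

-- B's value function
def pvF (vals : List (List Int)) (t : List Int) : Int :=
  ((PySem.Set.ofList (PySem.List.slice vals none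
      (some ((((PySem.List.index? vals t).getD 0 : Nat) : Int) + 1)))).length : Int)

-- B's fold, characterised: insert with a key-determined value over l from a dict that is
-- already 'map (t, f t) over s' yields 'map (t, f t) over update s l'.
lemma pvB_items (vals : List (List Int)) (l : List (List Int)) :
    ∀ (s : List (List Int)),
    ((l.foldl (fun (d : PySem.Dict (List Int) Int) t => d.insert t (pvF vals t))
        (PySem.Dict.mk (s.map (fun t => (t, pvF vals t)))))).items
    = (PySem.Set.update s l).map (fun t => (t, pvF vals t)) := by
  induction l with
  | nil => intro s; simp [PySem.Set.update_nil]
  | cons t l ih =>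
    intro s
    simp only [List.foldl_cons, PySem.Set.update_cons]
    by_cases h : t ∈ s
    · have hc : (PySem.Dict.mk (s.map (fun t => (t, pvF vals t)))).contains t = true := by
        rw [PySem.Dict.contains_eq_decide_mem_keys, PySem.Dict.keys_mk]
        simp only [List.map_map, Function.comp_def]
        simp [h]
      have hm : (PySem.Dict.mk (s.map (fun t => (t, pvF vals t)))).insert t (pvF vals t)
          = PySem.Dict.mk (s.map (fun t => (t, pvF vals t))) := by
        apply PySem.Dict.ext
        rw [PySem.Dict.items_insert_of_contains _ _ hc]
        show (s.map (fun t => (t, pvF vals t))).map _ = _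
        rw [List.map_map]
        apply List.map_congr_left
        intro u _
        by_cases hu : u = t <;> simp [hu]
      rw [hm, PySem.Set.add_of_mem h]
      exact ih s
    · have hc : (PySem.Dict.mk (s.map (fun t => (t, pvF vals t)))).contains t = false := by
        rw [PySem.Dict.contains_eq_decide_mem_keys, PySem.Dict.keys_mk]
        simp only [List.map_map, Function.comp_def]
        simp [h]
      have hm : (PySem.Dict.mk (s.map (fun t => (t, pvF vals t)))).insert t (pvF vals t)
          = PySem.Dict.mk ((s ++ [t]).map (fun t => (t, pvF vals t))) := by
        apply PySem.Dict.ext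
        rw [PySem.Dict.items_insert_of_not_contains _ _ hc]
        simp
      rw [hm, PySem.Set.add_of_not_mem h]
      exact ih (s ++ [t])

-- the per-element value: for the j-th element t of dedup vals, pvF vals t = j + 1
lemma pvF_at (vals : List (List Int)) (j : Nat) (hj : j < (PySem.Set.ofList vals).length) :
    pvF vals ((PySem.Set.ofList vals)[j]) = (j : Int) + 1 := by
  set t := (PySem.Set.ofList vals)[j] with ht
  have htmem : t ∈ vals := by
    rw [← PySem.Set.mem_ofList (xs := vals)]
    exact ht ▸ List.getElem_mem hj
  obtain ⟨k, hk⟩ : ∃ k, PySem.List.index? vals t = some k := by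
    have := (PySem.List.index?_isSome_iff vals t).mpr htmem
    exact Option.isSome_iff_exists.mp this
  obtain ⟨pre, suf, hsplit, hlen, hnot⟩ := (PySem.List.index?_eq_some_iff vals t k).mp hk
  -- the slice is pre ++ [t]
  have hslice : PySem.List.slice vals none
      (some ((((PySem.List.index? vals t).getD 0 : Nat) : Int) + 1)) = pre ++ [t] := by
    rw [hk, Option.getD_some]
    rw [show (((k : Nat) : Int) + 1) = (((k + 1 : Nat) : Int)) from by push_cast; ring]
    rw [PySem.List.slice_to_natCast, hsplit, ← hlen]
    simp [List.take_append]
  -- ofList (pre ++ [t]) = ofList pre ++ [t]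
  have hnotof : t ∉ PySem.Set.ofList pre := by
    rw [PySem.Set.mem_ofList]; exact hnot
  have hof : PySem.Set.ofList (pre ++ [t]) = PySem.Set.ofList pre ++ [t] := by
    rw [PySem.Set.ofList_append_singleton, PySem.Set.add_of_not_mem hnotof]
  -- decompose ofList vals
  have hvals : ∃ rest, PySem.Set.ofList vals = (PySem.Set.ofList pre ++ [t]) ++ rest := by
    rw [hsplit, show pre ++ t :: suf = (pre ++ [t]) ++ suf from by simp,
      PySem.Set.ofList_append, PySem.Set.update_eq_append_filter, hof]
    exact ⟨_, rfl⟩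
  obtain ⟨rest, hrest⟩ := hvals
  -- j = (ofList pre).length
  have hnd : (PySem.Set.ofList vals).Nodup := PySem.Set.nodup_ofList vals
  have hlen2 : (PySem.Set.ofList pre).length < (PySem.Set.ofList vals).length := by
    rw [hrest]; simp
  have hget : (PySem.Set.ofList vals)[(PySem.Set.ofList pre).length]'hlen2 = t := by
    rw [List.getElem_of_eq hrest]
    simp
  have hjeq : j = (PySem.Set.ofList pre).length := by
    have : (PySem.Set.ofList vals)[j] = (PySem.Set.ofList vals)[(PySem.Set.ofList pre).length] := by
      rw [hget, ← ht]
    exact (List.Nodup.getElem_inj_iff hnd).mp this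
  -- conclude
  rw [pvF, hslice, hof]
  simp [hjeq]

lemma pvMap_eq_numb (vals : List (List Int)) :
    (PySem.Set.ofList vals).map (fun t => (t, pvF vals t)) = pvNumb (PySem.Set.ofList vals) := by
  apply List.ext_getElem
  · simp [pvNumb, PySem.List.length_enumerate]
  · intro j h1 h2
    have hj : j < (PySem.Set.ofList vals).length := by simpa using h1
    simp only [List.getElem_map, pvNumb, PySem.List.getElem_enumerate]
    rw [pvF_at vals j hj]
    simp

-- ===== VERDICT (by name: the statement is the Claim_ definition above) =====
theorem genID_spec : Claim_equal_genID := by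
  intro famdict _ _
  unfold Spec_genID
  rw [pvA_eq]
  unfold genID_alt
  set vals := (PySem.List.pyRange 1 ((famdict.length : Int) + 1) 1).map
    (fun i => ((PySem.Dict.mk famdict).get? i).getD []) with hvals
  show pvNumb (PySem.Set.ofList vals)
    = (vals.foldl (fun (d : PySem.Dict (List Int) Int) t => d.insert t (pvF vals t))
        PySem.Dict.empty).items
  rw [show (PySem.Dict.empty : PySem.Dict (List Int) Int)
      = PySem.Dict.mk (([] : List (List Int)).map (fun t => (t, pvF vals t))) from rfl]
  rw [pvB_items, PySem.Set.update_nil_left, pvMap_eq_numb]
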